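-- pv_equiv track=rewrite | github.com/nmamano/MinCrossingsKnightsTour | Code/scripts/crossings.py | isCompatiblePair
-- ===== SOURCE A (Python) =====
-- from collections import defaultdict
--
-- cellMap = {
--     'A': 1, 'B': 2, 'C': 3, 'D': 4, 'E': 5, 'F': 6, 'G': 7,
--     'H': 12, 'I': 13, 'J': 14, 'K': 15, 'L': 16, 'M': 17,
--     'N': 23, 'O': 24, 'P': 25, 'Q': 26, 'R': 27,
--     'S': 34, 'T': 35, 'U': 36, 'V': 37,
--     'W': 45, 'X': 46, 'Y': 47,
--     'Z': 56, '[': 57,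
--     '@': 67
-- }
--
-- movesX = [1, 2,  2,  1, -1, -2, -2, -1]
--
-- movesY = [2, 1, -1, -2, -2, -1,  1,  2]
--
-- def isCompatiblePair(squares1, squares2, columnDistance):
--     assert len(squares1) == len(squares2)
--     rowsChecked = len(squares1)
--     edgeCounts = defaultdict(int)
--     countEdges(squares1, edgeCounts, 0)
--     countEdges(squares2, edgeCounts, columnDistance)
--     for edge in edgeCounts:
--         row1, column1, row2, column2 = edge
--         if (row1 < rowsChecked and column1 == 0 and row2 < rowsChecked and column2 == columnDistance):
--             if not edgeCounts[edge] == 2: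
--                 return False
--     return True
--
-- def countEdges(column, edgeCounts, columnIndex):
--     for row in range(len(column)):
--         index = column[row]
--         prevMove = cellMap[index] // 10
--         prevRow = movesY[prevMove] + row
--         prevColumn = movesX[prevMove] + columnIndex
--         nextMove = cellMap[index] % 10
--         nextRow = movesY[nextMove] + row
--         nextColumn = movesX[nextMove] + columnIndex
--
--         if prevColumn < columnIndex:
--             edgeCounts[(prevRow, prevColumn, row, columnIndex)] += 1
--         else:
--             edgeCounts[(row, columnIndex, prevRow, prevColumn)] += 1
--
--         if nextColumn < columnIndex:
--             edgeCounts[(nextRow, nextColumn, row, columnIndex)] += 1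
--         else:
--             edgeCounts[(row, columnIndex, nextRow, nextColumn)] += 1
-- ===== SOURCE B (Python) =====
-- # B: one pass per column collecting its boundary edges into a set; equality of the
-- # two sets replaces A's shared counter and the count==2 sweep (objective: simpler).
-- cellMap = {
--     'A': 1, 'B': 2, 'C': 3, 'D': 4, 'E': 5, 'F': 6, 'G': 7,
--     'H': 12, 'I': 13, 'J': 14, 'K': 15, 'L': 16, 'M': 17,
--     'N': 23, 'O': 24, 'P': 25, 'Q': 26, 'R': 27,
--     'S': 34, 'T': 35, 'U': 36, 'V': 37,
--     'W': 45, 'X': 46, 'Y': 47,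
--     'Z': 56, '[': 57,
--     '@': 67
-- }
--
-- movesX = [1, 2,  2,  1, -1, -2, -2, -1]
-- movesY = [2, 1, -1, -2, -2, -1,  1,  2]
--
-- def isCompatiblePair(squares1, squares2, columnDistance):
--     assert len(squares1) == len(squares2)
--     n = len(squares1)
--
--     def boundaryEdges(column, columnIndex):
--         edges = set()
--         for row, square in enumerate(column):
--             code = cellMap[square]
--             for move in (code // 10, code % 10):
--                 targetRow = movesY[move] + row
--                 targetColumn = movesX[move] + columnIndex
--                 if targetColumn < columnIndex:
--                     edge = (targetRow, targetColumn, row, columnIndex)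
--                 else:
--                     edge = (row, columnIndex, targetRow, targetColumn)
--                 if (edge[0] < n and edge[1] == 0 and edge[2] < n and edge[3] == columnDistance):
--                     edges.add(edge)
--         return edges
--
--     return boundaryEdges(squares1, 0) == boundaryEdges(squares2, columnDistance)
-- ===== Notes on version B (the rewrite author's own statement) =====
-- stated objective: simpler
-- what changed: B drops A's shared defaultdict counter and its second count==2 sweep over all edges: it collects each column's boundary edges (each column emits a given boundary edge at most once) into its own set in one pass and returns set equality.
import Mathlib
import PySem

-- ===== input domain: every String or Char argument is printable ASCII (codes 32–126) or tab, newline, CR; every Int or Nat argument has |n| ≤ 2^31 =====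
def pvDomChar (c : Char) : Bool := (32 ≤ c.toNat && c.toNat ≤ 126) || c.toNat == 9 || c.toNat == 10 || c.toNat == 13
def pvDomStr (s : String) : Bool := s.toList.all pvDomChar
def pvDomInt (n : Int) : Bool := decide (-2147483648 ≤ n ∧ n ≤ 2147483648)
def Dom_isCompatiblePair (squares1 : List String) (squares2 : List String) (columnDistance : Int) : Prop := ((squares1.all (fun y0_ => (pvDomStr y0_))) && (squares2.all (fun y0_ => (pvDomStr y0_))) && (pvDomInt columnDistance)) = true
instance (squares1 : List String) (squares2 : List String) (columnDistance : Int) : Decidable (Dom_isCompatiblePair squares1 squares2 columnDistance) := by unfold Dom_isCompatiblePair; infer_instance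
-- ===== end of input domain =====

-- B replaces A's shared edge counter + count==2 sweep by per-column boundary-edge sets compared for equality (simpler; same cost).


-- shared module-level constants of Source A / Source B
def cellMapD : PySem.Dict String Int := PySem.Dict.ofList
  [("A",1),("B",2),("C",3),("D",4),("E",5),("F",6),("G",7),
   ("H",12),("I",13),("J",14),("K",15),("L",16),("M",17),
   ("N",23),("O",24),("P",25),("Q",26),("R",27),
   ("S",34),("T",35),("U",36),("V",37),
   ("W",45),("X",46),("Y",47),
   ("Z",56),("[",57),
   ("@",67)]
def movesXL : List Int := [1, 2, 2, 1, -1, -2, -2, -1]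
def movesYL : List Int := [2, 1, -1, -2, -2, -1, 1, 2]

-- ===== PORT A =====
-- cellMap[index] raises KeyError on an unknown square; Pre_ excludes that, so the
-- `.getD 0` default is never reached on admitted inputs.
def countEdges (column : List String) (edgeCounts : PySem.Dict (Int × Int × Int × Int) Int) (columnIndex : Int) : PySem.Dict (Int × Int × Int × Int) Int :=
  (PySem.List.pyRange 0 column.length 1).foldl (fun d row =>
    let index := PySem.List.pyGetD column row ""
    let c := (cellMapD.get? index).getD 0
    let prevMove := PySem.Int.floordiv c 10
    let prevRow := PySem.List.pyGetD movesYL prevMove 0 + row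
    let prevColumn := PySem.List.pyGetD movesXL prevMove 0 + columnIndex
    let nextMove := PySem.Int.mod c 10
    let nextRow := PySem.List.pyGetD movesYL nextMove 0 + row
    let nextColumn := PySem.List.pyGetD movesXL nextMove 0 + columnIndex
    let d :=
      if prevColumn < columnIndex then d.modify (prevRow, prevColumn, row, columnIndex) 0 (· + 1)
      else d.modify (row, columnIndex, prevRow, prevColumn) 0 (· + 1)
    if nextColumn < columnIndex then d.modify (nextRow, nextColumn, row, columnIndex) 0 (· + 1)
    else d.modify (row, columnIndex, nextRow, nextColumn) 0 (· + 1)) edgeCounts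

def isCompatiblePair (squares1 : List String) (squares2 : List String) (columnDistance : Int) : Bool :=
  let rowsChecked : Int := squares1.length
  let ec := countEdges squares2 (countEdges squares1 PySem.Dict.empty 0) columnDistance
  ec.keys.all (fun e =>
    if e.1 < rowsChecked && e.2.1 == 0 && e.2.2.1 < rowsChecked && e.2.2.2 == columnDistance
    then ec.getD e 0 == 2 else true)

-- ===== PORT B =====
def boundaryEdges (column : List String) (columnIndex : Int) (columnDistance : Int) (n : Int) : PySem.Set (Int × Int × Int × Int) :=
  (PySem.List.enumerate column).foldl (fun s p =>
    let row := p.1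
    let c := (cellMapD.get? p.2).getD 0
    [PySem.Int.floordiv c 10, PySem.Int.mod c 10].foldl (fun s move =>
      let targetRow := PySem.List.pyGetD movesYL move 0 + row
      let targetColumn := PySem.List.pyGetD movesXL move 0 + columnIndex
      let e :=
        if targetColumn < columnIndex then (targetRow, targetColumn, row, columnIndex)
        else (row, columnIndex, targetRow, targetColumn)
      if e.1 < n && e.2.1 == 0 && e.2.2.1 < n && e.2.2.2 == columnDistance
      then PySem.Set.add s e else s) s) PySem.Set.empty

def isCompatiblePair_alt (squares1 : List String) (squares2 : List String) (columnDistance : Int) : Bool :=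
  let n : Int := squares1.length
  PySem.Set.equal (boundaryEdges squares1 0 columnDistance n)
                  (boundaryEdges squares2 columnDistance columnDistance n)

-- ===== PRECONDITION & SPEC =====
-- Pre_ excludes exactly where A raises: unequal lengths (AssertionError) and squares
-- that are not keys of cellMap (KeyError).
def Pre_isCompatiblePair (squares1 : List String) (squares2 : List String) (columnDistance : Int) : Prop :=
  squares1.length = squares2.length ∧
  (∀ s ∈ squares1, s ∈ cellMapD.keys) ∧ (∀ s ∈ squares2, s ∈ cellMapD.keys)
instance (squares1 : List String) (squares2 : List String) (columnDistance : Int) : Decidable (Pre_isCompatiblePair squares1 squares2 columnDistance) := by unfold Pre_isCompatiblePair; infer_instance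

def pvWitness_isCompatiblePair : List String × List String × Int := (["W", "N"], ["S", "B"], 1)

def Spec_isCompatiblePair (squares1 : List String) (squares2 : List String) (columnDistance : Int) (out : Bool) : Prop := out = isCompatiblePair_alt squares1 squares2 columnDistance
instance (squares1 : List String) (squares2 : List String) (columnDistance : Int) (out : Bool) : Decidable (Spec_isCompatiblePair squares1 squares2 columnDistance out) := by unfold Spec_isCompatiblePair; infer_instance

-- ===== CLAIM (what is proved, stated in full; the proofs are below) =====
def Claim_equal_isCompatiblePair : Prop := ∀ (squares1 : List String) (squares2 : List String) (columnDistance : Int), Dom_isCompatiblePair squares1 squares2 columnDistance → Pre_isCompatiblePair squares1 squares2 columnDistance → Spec_isCompatiblePair squares1 squares2 columnDistance (isCompatiblePair squares1 squares2 columnDistance)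

-- ===== LEMMAS AND PROOFS =====
-- (everything below is proof scaffolding)

-- the edge(s) one square emits, as pure lists
def edgeFor (ci row move : Int) : Int × Int × Int × Int :=
  let targetRow := PySem.List.pyGetD movesYL move 0 + row
  let targetColumn := PySem.List.pyGetD movesXL move 0 + ci
  if targetColumn < ci then (targetRow, targetColumn, row, ci)
  else (row, ci, targetRow, targetColumn)

def emits (ci row : Int) (sq : String) : List (Int × Int × Int × Int) :=
  let c := (cellMapD.get? sq).getD 0
  [PySem.Int.floordiv c 10, PySem.Int.mod c 10].map (edgeFor ci row)

def edgesOf (column : List String) (ci : Int) : List (Int × Int × Int × Int) :=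
  (PySem.List.enumerate column).flatMap (fun p => emits ci p.1 p.2)

def predE (n cd : Int) (e : Int × Int × Int × Int) : Bool :=
  e.1 < n && e.2.1 == 0 && e.2.2.1 < n && e.2.2.2 == cd

-- the per-cell facts the distinctness argument needs, decidable per cell value
def okVal (v : Int) : Bool :=
  let f := PySem.Int.floordiv v 10
  let m := PySem.Int.mod v 10
  decide (PySem.List.pyGetD movesXL f 0 ≠ 0) &&
  decide (PySem.List.pyGetD movesXL m 0 ≠ 0) &&
  !((PySem.List.pyGetD movesXL f 0 == PySem.List.pyGetD movesXL m 0) &&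
    (PySem.List.pyGetD movesYL f 0 == PySem.List.pyGetD movesYL m 0))

lemma okVal_of_key : ∀ s ∈ cellMapD.keys, okVal ((cellMapD.get? s).getD 0) = true := by decide

lemma foldl_flatMap {α β γ : Type} (l : List β) (g : β → List α) (f : γ → α → γ) (init : γ) :
    (l.flatMap g).foldl f init = l.foldl (fun a x => (g x).foldl f a) init := by
  induction l generalizing init with
  | nil => rfl
  | cons b t ih => simp [List.flatMap_cons, List.foldl_append, ih]

-- A's dict-building loop is the modify-counter fold over the emitted edge list
lemma countEdges_eq (column : List String) (d : PySem.Dict (Int × Int × Int × Int) Int) (ci : Int) :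
    countEdges column d ci = (edgesOf column ci).foldl (fun d e => d.modify e 0 (· + 1)) d := by
  unfold countEdges edgesOf
  rw [foldl_flatMap]
  rw [show (PySem.List.pyRange 0 column.length 1) = (PySem.List.pyRange 0 column.length 1) from rfl]
  have h := PySem.List.enumerate_eq_map_pyRange (xs := column) (d := "")
  rw [h, List.foldl_map]
  apply PySem.List.foldl_congr_mem
  intro acc x hx
  simp only [emits, edgeFor, List.map_cons, List.map_nil, List.foldl_cons, List.foldl_nil]
  split_ifs <;> rfl

lemma dict_eq_counter (squares1 squares2 : List String) (cd : Int) :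
    countEdges squares2 (countEdges squares1 PySem.Dict.empty 0) cd
      = PySem.Dict.counter (edgesOf squares1 0 ++ edgesOf squares2 cd) := by
  rw [countEdges_eq, countEdges_eq, PySem.Dict.counter_eq_foldl, List.foldl_append]

-- A as a proposition about counts
lemma portA_iff (squares1 squares2 : List String) (cd : Int) :
    isCompatiblePair squares1 squares2 cd = true ↔
      ∀ e ∈ edgesOf squares1 0 ++ edgesOf squares2 cd,
        predE (squares1.length : Int) cd e = true →
        ((edgesOf squares1 0 ++ edgesOf squares2 cd).count e : Int) = 2 := by
  simp only [isCompatiblePair, dict_eq_counter, PySem.Dict.keys_counter, List.all_eq_true,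
    PySem.Set.mem_ofList, PySem.Dict.getD_counter]
  constructor
  · intro h e he hp
    have := h e he
    unfold predE at hp
    rw [if_pos hp] at this
    exact_mod_cast beq_iff_eq.mp this
  · intro h e he
    by_cases hp : predE (squares1.length : Int) cd e = true
    · have := h e he hp
      unfold predE at hp
      rw [if_pos hp]
      exact beq_iff_eq.mpr (by exact_mod_cast this)
    · unfold predE at hp
      rw [if_neg hp]

-- B reduced to set-of-list of the filtered emitted edges
lemma boundaryEdges_eq (column : List String) (ci cd n : Int) :
    boundaryEdges column ci cd n = PySem.Set.ofList ((edgesOf column ci).filter (predE n cd)) := by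
  unfold boundaryEdges edgesOf
  rw [show PySem.Set.ofList = fun xs => xs.foldl PySem.Set.add [] from funext (fun xs => PySem.Set.ofList_eq_foldl xs)]
  simp only
  rw [List.filter_flatMap, foldl_flatMap]
  apply PySem.List.foldl_congr_mem
  intro acc p hp
  simp only [emits]
  rw [← PySem.List.foldl_if_eq_foldl_filter, List.foldl_map]
  simp only [edgeFor, predE]
  rfl

lemma portB_iff (squares1 squares2 : List String) (cd : Int) :
    isCompatiblePair_alt squares1 squares2 cd = true ↔
      ∀ e, (e ∈ (edgesOf squares1 0).filter (predE (squares1.length : Int) cd) ↔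
            e ∈ (edgesOf squares2 cd).filter (predE (squares1.length : Int) cd)) := by
  simp only [isCompatiblePair_alt, boundaryEdges_eq, PySem.Set.equal_iff, PySem.Set.mem_ofList]

-- where a boundary edge determines its source row
lemma mem_emits_row {ci cd n row : Int} {sq : String} {e : Int × Int × Int × Int}
    (hci : ci = 0 ∨ ci = cd) (hp : predE n cd e = true) (he : e ∈ emits ci row sq) :
    row = (if ci = 0 then e.1 else e.2.2.1) := by
  simp only [emits, List.mem_map, List.mem_cons, List.not_mem_nil, or_false] at he
  obtain ⟨mv, -, rfl⟩ := he
  simp only [predE, Bool.and_eq_true, decide_eq_true_eq, beq_iff_eq] at hp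
  rcases lt_or_ge (PySem.List.pyGetD movesXL mv 0 + ci) ci with hlt | hge
  · simp only [edgeFor, if_pos hlt] at hp ⊢
    obtain ⟨⟨⟨h1, h2⟩, h3⟩, h4⟩ := hp
    by_cases h0 : ci = 0
    · subst h0; exfalso; omega
    · rw [if_neg h0]
  · simp only [edgeFor, if_neg (not_lt.2 hge)] at hp ⊢
    obtain ⟨⟨⟨h1, h2⟩, h3⟩, h4⟩ := hp
    rw [if_pos h2]

-- the two edges one valid square emits are distinct
lemma count_emits_le_one {ci row : Int} {sq : String} (hok : okVal ((cellMapD.get? sq).getD 0) = true)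
    (e : Int × Int × Int × Int) : (emits ci row sq).count e ≤ 1 := by
  set c := (cellMapD.get? sq).getD 0 with hc
  simp only [okVal, Bool.and_eq_true, Bool.not_eq_true', Bool.and_eq_false_iff,
    decide_eq_true_eq, beq_eq_false_iff_ne] at hok
  obtain ⟨⟨hf, hm⟩, hne⟩ := hok
  simp only [emits, ← hc, List.map_cons, List.map_nil]
  by_cases heq : edgeFor ci row (PySem.Int.floordiv c 10) = edgeFor ci row (PySem.Int.mod c 10)
  · exfalso
    simp only [edgeFor] at heq
    split_ifs at heq <;> (simp only [Prod.mk.injEq] at heq) <;>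
      rcases hne with hne | hne <;> omega
  · simp [List.count_cons, List.count_nil]
    by_cases h1 : edgeFor ci row (PySem.Int.floordiv c 10) = e <;>
      by_cases h2 : edgeFor ci row (PySem.Int.mod c 10) = e <;>
      simp_all

lemma count_flatMap_le_one {α β : Type} [BEq α] [LawfulBEq α] (l : List β) (g : β → List α) (e : α)
    (hnd : l.Nodup) (huniq : ∀ p ∈ l, ∀ q ∈ l, e ∈ g p → e ∈ g q → p = q)
    (hcnt : ∀ p ∈ l, (g p).count e ≤ 1) : (l.flatMap g).count e ≤ 1 := by
  induction l with
  | nil => simp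
  | cons a t ih =>
    rw [List.flatMap_cons, List.count_append]
    rcases List.nodup_cons.1 hnd with ⟨hat, hndt⟩
    by_cases hea : e ∈ g a
    · have hz : (t.flatMap g).count e = 0 := by
        rw [List.count_eq_zero]
        intro hmem
        obtain ⟨q, hq, heq⟩ := List.mem_flatMap.1 hmem
        have : a = q := huniq a (by simp) q (by simp [hq]) hea heq
        exact hat (this ▸ hq)
      have := hcnt a (by simp)
      omega
    · have hz : (g a).count e = 0 := List.count_eq_zero.2 hea
      have := ih hndt (fun p hp q hq => huniq p (by simp [hp]) q (by simp [hq]))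
        (fun p hp => hcnt p (by simp [hp]))
      omega

lemma enumerate_nodup (column : List String) : (PySem.List.enumerate column).Nodup := by
  have h := PySem.List.pairwise_lt_enumerate (xs := column) (s := 0)
  refine h.imp ?_
  intro a b hlt he
  rw [he] at hlt
  exact lt_irrefl _ hlt

lemma count_edgesOf_le_one {column : List String} {ci cd n : Int}
    (hv : ∀ s ∈ column, s ∈ cellMapD.keys) (hci : ci = 0 ∨ ci = cd)
    {e : Int × Int × Int × Int} (hp : predE n cd e = true) :
    (edgesOf column ci).count e ≤ 1 := by
  unfold edgesOf
  apply count_flatMap_le_one _ _ _ (enumerate_nodup column)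
  · intro p hp' q hq' hep heq
    have hrp := mem_emits_row hci hp hep
    have hrq := mem_emits_row hci hp heq
    obtain ⟨kp, hkp, rfl⟩ := (PySem.List.mem_enumerate_iff _ _ _).1 hp'
    obtain ⟨kq, hkq, rfl⟩ := (PySem.List.mem_enumerate_iff _ _ _).1 hq'
    have hk : (kp : Int) = (kq : Int) := by
      have h := hrp.trans hrq.symm
      simpa using h
    have : kp = kq := by exact_mod_cast hk
    subst this; rfl
  · intro p hp'
    obtain ⟨k, hk, rfl⟩ := (PySem.List.mem_enumerate_iff _ _ _).1 hp'
    exact count_emits_le_one (okVal_of_key _ (hv _ (List.getElem_mem hk))) e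

-- the combinatorial heart: counts ≤ 1 per side turn "count == 2" into set equality
lemma counts_iff {α : Type} [BEq α] [LawfulBEq α] (E1 E2 : List α) (P : α → Bool)
    (h1 : ∀ e, P e = true → E1.count e ≤ 1) (h2 : ∀ e, P e = true → E2.count e ≤ 1) :
    ((∀ e ∈ E1 ++ E2, P e = true → ((E1 ++ E2).count e : Int) = 2) ↔
      ∀ e, (e ∈ E1.filter P ↔ e ∈ E2.filter P)) := by
  constructor
  · intro h e
    simp only [List.mem_filter]
    constructor
    · rintro ⟨he1, hpe⟩
      refine ⟨?_, hpe⟩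
      have hc := h e (List.mem_append.2 (Or.inl he1)) hpe
      rw [List.count_append] at hc
      have c1 : 1 ≤ E1.count e := List.one_le_count_iff.2 he1
      have := h1 e hpe; have := h2 e hpe
      have : 1 ≤ E2.count e := by omega
      exact List.one_le_count_iff.1 this
    · rintro ⟨he2, hpe⟩
      refine ⟨?_, hpe⟩
      have hc := h e (List.mem_append.2 (Or.inr he2)) hpe
      rw [List.count_append] at hc
      have c2 : 1 ≤ E2.count e := List.one_le_count_iff.2 he2
      have := h1 e hpe; have := h2 e hpe
      have : 1 ≤ E1.count e := by omega
      exact List.one_le_count_iff.1 this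
  · intro h e he hpe
    have hiff := h e
    simp only [List.mem_filter] at hiff
    rw [List.count_append]
    rcases List.mem_append.1 he with h1m | h2m
    · have h2m : e ∈ E2 := (hiff.1 ⟨h1m, hpe⟩).1
      have a1 := h1 e hpe; have a2 := h2 e hpe
      have b1 : 1 ≤ E1.count e := List.one_le_count_iff.2 h1m
      have b2 : 1 ≤ E2.count e := List.one_le_count_iff.2 h2m
      omega
    · have h1m : e ∈ E1 := (hiff.2 ⟨h2m, hpe⟩).1
      have a1 := h1 e hpe; have a2 := h2 e hpe
      have b1 : 1 ≤ E1.count e := List.one_le_count_iff.2 h1m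
      have b2 : 1 ≤ E2.count e := List.one_le_count_iff.2 h2m
      omega

-- ===== VERDICT (by name: the statement is the Claim_ definition above) =====
theorem isCompatiblePair_spec : Claim_equal_isCompatiblePair := by
  intro squares1 squares2 cd _ hpre
  obtain ⟨hlen, hv1, hv2⟩ := hpre
  unfold Spec_isCompatiblePair
  rw [Bool.eq_iff_iff, portA_iff, portB_iff]
  exact counts_iff (edgesOf squares1 0) (edgesOf squares2 cd) (predE (squares1.length : Int) cd)
    (fun e hp => count_edgesOf_le_one hv1 (Or.inl rfl) hp)
    (fun e hp => count_edgesOf_le_one hv2 (Or.inr rfl) hp)
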